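-- pv_equiv track=rewrite | github.com/FangXinyu-0913/xtuner | xtuner/dataset/samplers/video_batch_sampler.py | find_sublist_index
-- ===== SOURCE A (Python) =====
-- def find_sublist_index(lengths, f) -> int:
--     # 计算总长度
--     total_length = sum(lengths)
--     # 如果 f 超出总长度范围，返回 None
--     if f > total_length:
--         return None
--     # 计算偏移量
--     offset = f - 1  # 注意索引从 0 开始，所以要减 1
--     # 寻找偏移量所在的子列表
--     for index, length in enumerate(lengths):
--         if offset < length:
--             return index
--         offset -= length
--     return None  # 如果未找到，返回 None
-- ===== SOURCE B (Python) =====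
-- from itertools import accumulate
--
--
-- def find_sublist_index(lengths, f) -> int:
--     prefix = list(accumulate(lengths))
--     total = prefix[-1] if prefix else 0
--     if f > total:
--         return None
--     for index, p in enumerate(prefix):
--         if f <= p:
--             return index
--     return None
-- ===== Notes on version B (the rewrite author's own statement) =====
-- stated objective: alternative
-- what changed: Replaces the mutable-offset subtraction loop by a precomputed running-prefix-sum list that is scanned once for the first prefix >= f, threshold-style, with no per-step arithmetic on the query.
import Mathlib
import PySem

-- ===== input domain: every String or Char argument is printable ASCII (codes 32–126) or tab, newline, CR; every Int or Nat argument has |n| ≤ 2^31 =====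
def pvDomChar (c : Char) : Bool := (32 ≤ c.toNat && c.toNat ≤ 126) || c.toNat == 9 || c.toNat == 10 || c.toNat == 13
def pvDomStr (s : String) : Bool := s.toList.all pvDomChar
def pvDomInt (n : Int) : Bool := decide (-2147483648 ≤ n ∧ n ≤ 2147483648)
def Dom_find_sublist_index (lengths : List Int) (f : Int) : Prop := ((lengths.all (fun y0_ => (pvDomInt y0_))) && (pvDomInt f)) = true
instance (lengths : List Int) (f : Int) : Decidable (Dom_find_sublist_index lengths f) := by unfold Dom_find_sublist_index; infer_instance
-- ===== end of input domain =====

-- B replaces A's mutable-offset subtraction loop by a precomputed running-prefix-sum list scanned once for the first prefix ≥ f (alternative decomposition, same cost).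


-- ===== PORT A =====
-- A's for-loop over enumerate(lengths), carrying the shrinking offset and the running index
def fsiGoA : List Int → Int → Int → Option Int
  | [], _, _ => none
  | l :: ls, off, idx => if off < l then some idx else fsiGoA ls (off - l) (idx + 1)

def find_sublist_index (lengths : List Int) (f : Int) : Option Int :=
  let total_length := lengths.sum
  if f > total_length then none
  else fsiGoA lengths (f - 1) 0

-- ===== PORT B =====
-- itertools.accumulate(lengths) with running accumulator
def fsiPrefix : List Int → Int → List Int
  | [], _ => []
  | x :: xs, acc => (acc + x) :: fsiPrefix xs (acc + x)

-- the for-loop over enumerate(prefix): first index with f <= p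
def fsiGoB : List Int → Int → Int → Option Int
  | [], _, _ => none
  | p :: ps, f, idx => if f ≤ p then some idx else fsiGoB ps f (idx + 1)

def find_sublist_index_alt (lengths : List Int) (f : Int) : Option Int :=
  let prefixes := fsiPrefix lengths 0
  let total := (prefixes.getLast?).getD 0
  if f > total then none
  else fsiGoB prefixes f 0

-- ===== PRECONDITION & SPEC =====
def Spec_find_sublist_index (lengths : List Int) (f : Int) (out : Option Int) : Prop := out = find_sublist_index_alt lengths f
instance (lengths : List Int) (f : Int) (out : Option Int) : Decidable (Spec_find_sublist_index lengths f out) := by unfold Spec_find_sublist_index; infer_instance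

-- ===== CLAIM (what is proved, stated in full; the proofs are below) =====
def Claim_equal_find_sublist_index : Prop := ∀ (lengths : List Int) (f : Int), Dom_find_sublist_index lengths f → Spec_find_sublist_index lengths f (find_sublist_index lengths f)

-- ===== LEMMAS AND PROOFS =====

theorem fsiPrefix_ne_nil (ls : List Int) (acc : Int) (h : ls ≠ []) : fsiPrefix ls acc ≠ [] := by
  cases ls with
  | nil => exact absurd rfl h
  | cons x xs => simp [fsiPrefix]

-- the last running prefix is acc plus the total sum
theorem fsiPrefix_getLast (ls : List Int) (acc : Int) (h : ls ≠ []) :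
    (fsiPrefix ls acc).getLast? = some (acc + ls.sum) := by
  induction ls generalizing acc with
  | nil => exact absurd rfl h
  | cons x xs ih =>
    simp only [fsiPrefix, List.sum_cons]
    cases hxs : fsiPrefix xs (acc + x) with
    | nil =>
      have hx : xs = [] := by
        by_contra hne
        exact fsiPrefix_ne_nil xs (acc + x) hne hxs
      subst hx
      simp [fsiPrefix] at hxs ⊢
    | cons y ys =>
      have hxne : xs ≠ [] := by
        intro he; subst he; simp [fsiPrefix] at hxs
      have := ih (acc + x) hxne
      rw [hxs] at this
      rw [List.getLast?_cons_cons, this]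
      ring_nf

-- loop invariant: A's offset loop equals B's threshold scan over the prefixes
theorem fsiGo_eq (ls : List Int) (off acc idx : Int) :
    fsiGoA ls off idx = fsiGoB (fsiPrefix ls acc) (off + acc + 1) idx := by
  induction ls generalizing off acc idx with
  | nil => simp [fsiGoA, fsiPrefix, fsiGoB]
  | cons l ls ih =>
    simp only [fsiGoA, fsiPrefix, fsiGoB]
    by_cases h : off < l
    · rw [if_pos h, if_pos (by omega : off + acc + 1 ≤ acc + l)]
    · rw [if_neg h, if_neg (by omega : ¬ (off + acc + 1 ≤ acc + l))]
      have := ih (off - l) (acc + l) (idx + 1)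
      convert this using 2
      omega

-- ===== VERDICT (by name: the statement is the Claim_ definition above) =====
theorem find_sublist_index_spec : Claim_equal_find_sublist_index := by
  intro lengths f _
  unfold Spec_find_sublist_index find_sublist_index find_sublist_index_alt
  cases lengths with
  | nil => simp [fsiPrefix, fsiGoA, fsiGoB]
  | cons x xs =>
    have htot : ((fsiPrefix (x :: xs) 0).getLast?).getD 0 = (x :: xs).sum := by
      rw [fsiPrefix_getLast (x :: xs) 0 (by simp)]
      simp
    simp only [htot]
    split
    · rfl
    · have := fsiGo_eq (x :: xs) (f - 1) 0 0
      simpa using this
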